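-- pv_equiv track=rewrite | github.com/zfeny/Emby_auto | remove_local.py | _split_env_values
-- ===== SOURCE A (Python) =====
-- from typing import List, Tuple
--
-- def _split_env_values(raw_value: str) -> List[str]:
--     """Split a raw env var value into individual entries."""
--     parts: List[str] = [raw_value]
--     for separator in (";", ",", "\n"):
--         next_parts: List[str] = []
--         for part in parts:
--             next_parts.extend(part.split(separator))
--         parts = next_parts
--     return [part.strip() for part in parts if part.strip()]
-- ===== SOURCE B (Python) =====
-- from typing import List
--
--
-- def _split_env_values(raw_value: str) -> List[str]:
--     """Split a raw env var value into individual entries (single pass)."""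
--     tokens: List[str] = []
--     buf: List[str] = []
--     for ch in raw_value:
--         if ch in ";,\n":
--             tokens.append("".join(buf))
--             buf = []
--         else:
--             buf.append(ch)
--     tokens.append("".join(buf))
--     return [t.strip() for t in tokens if t.strip()]
-- ===== Notes on version B (the rewrite author's own statement) =====
-- stated objective: alternative
-- what changed: Replaces the three successive split passes (which rebuild the whole parts list once per separator) by a single left-to-right character scan that flushes a token buffer at each separator character, then applies the same strip/filter step.
import Mathlib
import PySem

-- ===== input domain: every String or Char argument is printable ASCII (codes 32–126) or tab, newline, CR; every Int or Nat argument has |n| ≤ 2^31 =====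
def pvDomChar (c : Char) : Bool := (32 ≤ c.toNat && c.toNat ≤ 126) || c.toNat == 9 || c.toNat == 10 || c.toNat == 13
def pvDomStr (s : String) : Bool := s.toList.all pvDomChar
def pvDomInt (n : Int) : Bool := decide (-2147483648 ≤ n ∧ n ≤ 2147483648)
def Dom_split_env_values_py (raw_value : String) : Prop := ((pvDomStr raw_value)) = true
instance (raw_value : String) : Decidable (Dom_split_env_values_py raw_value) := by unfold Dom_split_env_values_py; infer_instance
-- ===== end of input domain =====

-- B replaces A's three successive split passes by one character scan with a token buffer; same strip/filter step (objective: alternative single-pass decomposition).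

-- ===== PORT A =====
-- A: parts = [raw]; for sep in (';', ',', '\n'): parts = concat of part.split(sep); then strip/filter.
def split_env_values_py (raw_value : String) : List String :=
  let parts : List (List Char) :=
    [[';'], [','], ['\n']].foldl
      (fun parts sep =>
        parts.foldl (fun nextParts part => nextParts ++ PySem.Chars.splitOn part sep) [])
      [raw_value.toList]
  (parts.filter (fun part => !(PySem.Chars.strip part).isEmpty)).map
    (fun part => String.ofList (PySem.Chars.strip part))

-- ===== PORT B =====
def pvIsSep (c : Char) : Bool := (c == ';' || c == ',') || c == '\n'

-- B's single pass: flush the buffer on each separator, flush once more at the end.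
def pvScan (buf : List Char) : List Char → List (List Char)
  | [] => [buf.reverse]
  | c :: rest => if pvIsSep c then buf.reverse :: pvScan [] rest else pvScan (c :: buf) rest

def split_env_values_py_alt (raw_value : String) : List String :=
  let tokens := pvScan [] raw_value.toList
  (tokens.filter (fun t => !(PySem.Chars.strip t).isEmpty)).map
    (fun t => String.ofList (PySem.Chars.strip t))

-- ===== PRECONDITION & SPEC =====
def Spec_split_env_values_py (raw_value : String) (out : List String) : Prop := out = split_env_values_py_alt raw_value
instance (raw_value : String) (out : List String) : Decidable (Spec_split_env_values_py raw_value out) := by unfold Spec_split_env_values_py; infer_instance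

-- ===== CLAIM (what is proved, stated in full; the proofs are below) =====
def Claim_equal_split_env_values_py : Prop := ∀ (raw_value : String), Dom_split_env_values_py raw_value → Spec_split_env_values_py raw_value (split_env_values_py raw_value)

-- ===== LEMMAS AND PROOFS =====

-- One-predicate splitter used only by the proofs to relate the two programs.
def pvSplitP (p : Char → Bool) : List Char → List (List Char)
  | [] => [[]]
  | c :: cs => if p c then [] :: pvSplitP p cs else (pvSplitP p cs).modifyHead (c :: ·)

theorem pvSplitP_ne_nil (p : Char → Bool) (l : List Char) : pvSplitP p l ≠ [] := by
  induction l with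
  | nil => simp [pvSplitP]
  | cons c cs ih =>
    simp only [pvSplitP]
    split
    · simp
    · cases h : pvSplitP p cs with
      | nil => exact absurd h ih
      | cons a t => simp [List.modifyHead]

theorem pv_modifyHead_id (l : List (List Char)) : l.modifyHead (fun t => t) = l := by
  cases l
  · simp
  · simp

theorem pv_beq_comm (c x : Char) : (c == x) = (x == c) := by
  rcases eq_or_ne c x with h | h
  · simp [h]
  · simp [h, h.symm]

-- splitOn with a single-character separator is pvSplitP with a pending prefix.
theorem pv_go_eq (c : Char) :
    ∀ (fuel : Nat) (l cur : List Char) (acc : List (List Char)), l.length ≤ fuel →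
      PySem.Chars.splitOn.go [c] fuel l cur acc
        = acc.reverse ++ (pvSplitP (· == c) l).modifyHead (fun t => cur.reverse ++ t) := by
  intro fuel
  induction fuel with
  | zero =>
    intro l cur acc h
    have hl : l = [] := List.eq_nil_of_length_eq_zero (Nat.le_zero.mp h)
    subst hl
    simp [PySem.Chars.splitOn.go, pvSplitP]
  | succ n ih =>
    intro l cur acc h
    cases l with
    | nil => simp [PySem.Chars.splitOn.go, pvSplitP]
    | cons x rest =>
      simp only [PySem.Chars.splitOn.go, List.isPrefixOf,
        Bool.and_true, List.length_cons, List.drop_succ_cons]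
      by_cases hx : c = x
      · subst hx
        simp only [beq_self_eq_true, if_pos, List.length_nil, List.drop_zero]
        rw [ih rest [] (cur.reverse :: acc) (Nat.le_of_succ_le_succ h)]
        simp [pvSplitP, pv_modifyHead_id]
      · have hb : (c == x) = false := by simp [hx]
        have hb2 : (x == c) = false := by rw [← pv_beq_comm]; exact hb
        rw [hb]
        simp only [Bool.false_eq_true, if_false]
        rw [ih rest (x :: cur) acc (Nat.le_of_succ_le_succ h)]
        simp only [pvSplitP, hb2, Bool.false_eq_true, if_false, List.modifyHead_modifyHead]
        have hfun : (fun t => (x :: cur).reverse ++ t)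
            = ((fun t => cur.reverse ++ t) ∘ fun t => x :: t) := by
          funext t; simp
        rw [hfun]

theorem pv_splitOn_single (c : Char) (l : List Char) :
    PySem.Chars.splitOn l [c] = pvSplitP (· == c) l := by
  unfold PySem.Chars.splitOn
  rw [pv_go_eq c (l.length + 1) l [] [] (Nat.le_succ _)]
  simp [pv_modifyHead_id]

-- splitting each piece again fuses into splitting on the union of the predicates.
theorem pv_fuse (p q : Char → Bool) :
    ∀ l : List Char, (pvSplitP p l).flatMap (pvSplitP q) = pvSplitP (fun c => p c || q c) l := by
  intro l
  induction l with
  | nil => simp [pvSplitP]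
  | cons c cs ih =>
    by_cases hp : p c = true
    · simp [pvSplitP, hp, ih]
    · have hp' : p c = false := by simpa using hp
      by_cases hq : q c = true
      · obtain ⟨h, t, hht⟩ := List.exists_cons_of_ne_nil (pvSplitP_ne_nil p cs)
        simp only [pvSplitP, hp', hq, Bool.false_or, Bool.false_eq_true, if_false, if_true, hht]
        simp only [List.modifyHead, List.flatMap_cons]
        simp only [pvSplitP, hq, if_true]
        rw [← ih, hht]
        simp
      · have hq' : q c = false := by simpa using hq
        obtain ⟨h, t, hht⟩ := List.exists_cons_of_ne_nil (pvSplitP_ne_nil p cs)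
        obtain ⟨h2, t2, hht2⟩ := List.exists_cons_of_ne_nil (pvSplitP_ne_nil q h)
        simp only [pvSplitP, hp', hq', Bool.or_self, Bool.false_eq_true, if_false, hht]
        simp only [List.modifyHead, List.flatMap_cons]
        simp only [pvSplitP, hq', Bool.false_eq_true, if_false, hht2]
        rw [← ih, hht]
        simp [hht2, List.modifyHead]

-- B's scanner is pvSplitP with a pending (reversed) buffer.
theorem pv_scan_eq : ∀ (l buf : List Char),
    pvScan buf l = (pvSplitP pvIsSep l).modifyHead (fun t => buf.reverse ++ t) := by
  intro l
  induction l with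
  | nil => intro buf; simp [pvScan, pvSplitP]
  | cons c rest ih =>
    intro buf
    by_cases hs : pvIsSep c = true
    · simp [pvScan, pvSplitP, hs, ih, pv_modifyHead_id]
    · have hs' : pvIsSep c = false := by simpa using hs
      simp only [pvScan, pvSplitP, hs', Bool.false_eq_true, if_false, ih,
        List.modifyHead_modifyHead]
      have hfun : (fun t => (c :: buf).reverse ++ t)
          = ((fun t => buf.reverse ++ t) ∘ fun t => c :: t) := by
        funext t; simp
      rw [hfun]

-- ===== VERDICT (by name: the statement is the Claim_ definition above) =====
theorem split_env_values_py_spec : Claim_equal_split_env_values_py := by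
  intro raw_value _
  show split_env_values_py raw_value = split_env_values_py_alt raw_value
  unfold split_env_values_py split_env_values_py_alt
  dsimp only
  have hparts :
      ([[';'], [','], ['\n']] : List (List Char)).foldl
        (fun parts sep =>
          parts.foldl (fun nextParts part => nextParts ++ PySem.Chars.splitOn part sep) [])
        [raw_value.toList]
        = pvScan [] raw_value.toList := by
    simp only [List.foldl_cons, List.foldl_nil, PySem.List.foldl_append_eq_flatMap,
      List.nil_append, List.flatMap_cons, List.flatMap_nil, List.append_nil]
    simp only [pv_splitOn_single]
    rw [pv_fuse, pv_fuse, pv_scan_eq raw_value.toList []]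
    simp only [List.reverse_nil, List.nil_append]
    rw [pv_modifyHead_id]
    rfl
  rw [hparts]
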